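-- pv_equiv track=rewrite | github.com/Python-course/Python-course | src/tasks/task_3_5.py | to_symmetric_ternary_number
-- ===== SOURCE A (Python) =====
-- from itertools import product
--
-- symmetric_ternary_numbers = {"-": -1, "0": 0, "+": +1}
--
-- def to_symmetric_ternary_number(decimal: int) -> str:
--     """
--     Преобразует число из десятичной системы счисления в симметричную троичную.
--
--     :param decimal: Десятичное число.
--     :return: Троичное число.
--     """
--
--     # Количество цифр в для перебора.
--     size = 1
--
--     while True:
--         # Находим троичное число полным перебором.
--         ternary_number = list(filter(
--             lambda x: from_symmetric_ternary_number(x) == decimal,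
--             ["".join(x) for x in product("".join(symmetric_ternary_numbers.keys()), repeat=size)]
--         ))
--
--         if len(ternary_number) == 0:
--             size += 1
--         else:
--             return ternary_number[0]
--
-- def from_symmetric_ternary_number(ternary_number: str) -> int:
--     """
--     Преобразует число из симметричной троичной системы счисления в десятичную.
--
--     :param ternary_number: Троичное число.
--     :return: Десятичное число.
--     """
--
--     return sum([symmetric_ternary_numbers[ternary_number[::-1][i]] * 3 ** i for i in range(len(ternary_number))[::-1]])
-- ===== SOURCE B (Python) =====
-- def to_symmetric_ternary_number(decimal: int) -> str:
--     """Balanced-ternary conversion digit by digit: repeated division by 3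
--     with carry, instead of brute-force enumeration of all candidate strings."""
--     if decimal == 0:
--         return "0"
--     n = decimal
--     digits = []
--     while n != 0:
--         r = n % 3
--         n //= 3
--         if r == 2:
--             r = -1
--             n += 1
--         digits.append("-0+"[r + 1])
--     return "".join(reversed(digits))
-- ===== Notes on version B (the rewrite author's own statement) =====
-- stated objective: faster
-- what changed: Replaces brute-force enumeration of every candidate digit string of growing length (checking each by re-evaluating its value) with the direct digit-by-digit construction of the balanced-ternary representation via repeated division by three with carry.
import Mathlib
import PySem

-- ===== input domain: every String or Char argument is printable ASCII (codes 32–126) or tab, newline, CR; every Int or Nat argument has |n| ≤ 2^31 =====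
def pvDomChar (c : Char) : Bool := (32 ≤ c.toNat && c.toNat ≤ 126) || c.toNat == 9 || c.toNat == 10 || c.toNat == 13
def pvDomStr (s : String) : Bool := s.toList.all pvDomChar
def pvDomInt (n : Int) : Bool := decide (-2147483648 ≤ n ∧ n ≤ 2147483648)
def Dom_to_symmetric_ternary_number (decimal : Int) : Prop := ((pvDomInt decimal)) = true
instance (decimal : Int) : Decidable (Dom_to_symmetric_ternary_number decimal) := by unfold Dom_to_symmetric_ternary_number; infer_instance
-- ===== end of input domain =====

-- B replaces A's brute-force enumeration of all candidate strings of growing length with the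
-- direct digit-by-digit mod-3-with-carry balanced-ternary construction (measurably faster).

-- ===== PORT A =====
-- symmetric_ternary_numbers[c]: the dict {"-": -1, "0": 0, "+": 1}. Inside A it is only ever
-- applied to characters of the generated candidate strings, i.e. to '-', '0', '+' (KeyError unreachable).
def digOf (c : Char) : Int := if c = '-' then -1 else if c = '+' then 1 else 0

-- from_symmetric_ternary_number: sum over i in range(len)[::-1] of dict[s[::-1][i]] * 3**i.
-- getD is exact here: every index i drawn from range(len(s)) is in range of s[::-1].
def fromSym (s : List Char) : Int :=
  ((List.range s.length).reverse).foldl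
    (fun acc i => acc + digOf (s.reverse.getD i ' ') * 3 ^ i) 0

-- ["".join(x) for x in itertools.product("-0+", repeat=size)]: all length-size strings over
-- '-','0','+' in product order (first coordinate outermost).
def allS : Nat → List (List Char)
  | 0 => [[]]
  | k + 1 => ['-', '0', '+'].flatMap (fun c => (allS k).map (fun s => c :: s))

-- the 'while True' loop of A; the fuel argument only makes it total (inside Dom the loop
-- returns long before the fuel runs out — proved below).
def loopA (n : Int) (size fuel : Nat) : String :=
  match (allS size).filter (fun s => fromSym s == n) with
  | [] =>
    match fuel with
    | 0 => ""             -- fuel exhausted; unreachable on Dom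
    | f + 1 => loopA n (size + 1) f
  | x :: _ => String.mk x
termination_by fuel

def to_symmetric_ternary_number (decimal : Int) : String := loopA decimal 1 64

-- ===== PORT B =====
-- the while loop of B: digits are appended least-significant first and the list is reversed at
-- the end, which is exactly 'digits of the quotient ++ [current digit]'; "-0+"[r+1] with the
-- reassigned r ∈ {-1, 0, 1} is written out as the three characters.
def altDigits (n : Int) : List Char :=
  if h0 : n = 0 then []
  else
    if hr : PySem.Int.mod n 3 = 2 then
      altDigits (PySem.Int.floordiv n 3 + 1) ++ ['-']
    else
      altDigits (PySem.Int.floordiv n 3) ++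
        [if PySem.Int.mod n 3 = 0 then '0' else '+']
termination_by n.natAbs
decreasing_by
  · rw [PySem.Int.mod_eq_emod_of_pos (by norm_num)] at hr
    rw [PySem.Int.floordiv_eq_ediv_of_pos (by norm_num)]
    omega
  · rw [PySem.Int.mod_eq_emod_of_pos (by norm_num)] at hr
    rw [PySem.Int.floordiv_eq_ediv_of_pos (by norm_num)]
    omega

def to_symmetric_ternary_number_alt (decimal : Int) : String :=
  if decimal = 0 then "0" else String.mk (altDigits decimal)

-- ===== PRECONDITION & SPEC =====
def Spec_to_symmetric_ternary_number (decimal : Int) (out : String) : Prop := out = to_symmetric_ternary_number_alt decimal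
instance (decimal : Int) (out : String) : Decidable (Spec_to_symmetric_ternary_number decimal out) := by unfold Spec_to_symmetric_ternary_number; infer_instance

-- ===== CLAIM (what is proved, stated in full; the proofs are below) =====
def Claim_equal_to_symmetric_ternary_number : Prop := ∀ (decimal : Int), Dom_to_symmetric_ternary_number decimal → Spec_to_symmetric_ternary_number decimal (to_symmetric_ternary_number decimal)

-- ===== LEMMAS AND PROOFS =====

-- little-endian value of a digit string (the reverse of the strings both ports build)
def valr : List Char → Int
  | [] => 0
  | c :: cs => digOf c + 3 * valr cs

def alphaC (c : Char) : Prop := c = '-' ∨ c = '0' ∨ c = '+'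

theorem digOf_cases (c : Char) : digOf c = -1 ∨ digOf c = 0 ∨ digOf c = 1 := by
  unfold digOf; split_ifs <;> simp

theorem valr_bound : ∀ xs : List Char, 2 * (valr xs).natAbs < 3 ^ xs.length := by
  intro xs
  induction xs with
  | nil => simp [valr]
  | cons c cs ih =>
    have hd := digOf_cases c
    simp only [valr, List.length_cons, pow_succ]
    omega

theorem valr_inj : ∀ xs ys : List Char, (∀ c ∈ xs, alphaC c) → (∀ c ∈ ys, alphaC c) →
    xs.length = ys.length → valr xs = valr ys → xs = ys := by
  intro xs
  induction xs with
  | nil => intro ys _ _ hl _; cases ys <;> simp_all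
  | cons c cs ih =>
    intro ys hxa hya hl hv
    cases ys with
    | nil => simp at hl
    | cons d ds =>
      have hca : alphaC c := hxa c (by simp)
      have hda : alphaC d := hya d (by simp)
      simp only [valr] at hv
      have hdig : digOf c = digOf d ∧ valr cs = valr ds := by
        have h1 := digOf_cases c
        have h2 := digOf_cases d
        constructor <;> omega
      have hc : c = d := by
        rcases hca with h | h | h <;> rcases hda with h' | h' | h' <;>
          simp_all [digOf]
      subst hc
      have : cs = ds := ih ds (fun x hx => hxa x (by simp [hx]))
        (fun x hx => hya x (by simp [hx])) (by simpa using hl) hdig.2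
      simp [this]

-- value of B's digit list
theorem valr_rev_altDigits (n : Int) : valr (altDigits n).reverse = n := by
  induction n using altDigits.induct with
  | case1 => rw [altDigits]; simp [valr]
  | case2 x hx hr ih =>
    rw [altDigits, dif_neg hx, dif_pos hr]
    rw [PySem.Int.mod_eq_emod_of_pos (by norm_num)] at hr
    rw [PySem.Int.floordiv_eq_ediv_of_pos (by norm_num)] at ih ⊢
    simp only [List.reverse_append, List.reverse_cons, List.reverse_nil, List.nil_append,
      List.cons_append, valr, ih]
    simp [digOf]
    omega
  | case3 x hx hr ih =>
    rw [altDigits, dif_neg hx, dif_neg hr]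
    rw [PySem.Int.mod_eq_emod_of_pos (by norm_num)] at hr
    have hb : 0 ≤ x % 3 ∧ x % 3 < 3 :=
      ⟨Int.emod_nonneg x (by norm_num), Int.emod_lt_of_pos x (by norm_num)⟩
    rw [PySem.Int.floordiv_eq_ediv_of_pos (by norm_num)] at ih ⊢
    rw [PySem.Int.mod_eq_emod_of_pos (by norm_num)]
    simp only [List.reverse_append, List.reverse_cons, List.reverse_nil, List.nil_append,
      List.cons_append, valr, ih]
    split
    · simp [digOf]
      omega
    · simp [digOf]
      omega

theorem altDigits_alpha (n : Int) : ∀ c ∈ altDigits n, alphaC c := by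
  induction n using altDigits.induct with
  | case1 => rw [altDigits]; simp
  | case2 x hx hr ih =>
    rw [altDigits, dif_neg hx, dif_pos hr]
    intro c hc
    rcases List.mem_append.mp hc with h | h
    · exact ih c h
    · simp at h; subst h; left; rfl
  | case3 x hx hr ih =>
    rw [altDigits, dif_neg hx, dif_neg hr]
    intro c hc
    rcases List.mem_append.mp hc with h | h
    · exact ih c h
    · simp at h; subst h; split <;> simp [alphaC]

-- minimality: no shorter string can have value n
theorem altDigits_lb (n : Int) (hn : n ≠ 0) :
    altDigits n ≠ [] ∧ 3 ^ ((altDigits n).length - 1) < 2 * n.natAbs := by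
  induction n using altDigits.induct with
  | case1 => exact absurd rfl hn
  | case2 x hx hr ih =>
    rw [altDigits, dif_neg hx, dif_pos hr]
    rw [PySem.Int.mod_eq_emod_of_pos (by norm_num)] at hr
    rw [PySem.Int.floordiv_eq_ediv_of_pos (by norm_num)] at ih ⊢
    refine ⟨by simp, ?_⟩
    by_cases h2 : x / 3 + 1 = 0
    · rw [h2]
      simp [altDigits]
      omega
    · rcases ih h2 with ⟨hne, hlt⟩
      have hL : 1 ≤ (altDigits (x / 3 + 1)).length := List.length_pos_iff.mpr hne
      simp only [List.length_append, List.length_cons, List.length_nil]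
      have hpow : 3 ^ ((altDigits (x / 3 + 1)).length + 1 - 1)
          = 3 * 3 ^ ((altDigits (x / 3 + 1)).length - 1) := by
        rw [Nat.add_sub_cancel]
        conv_lhs => rw [show (altDigits (x / 3 + 1)).length
          = (altDigits (x / 3 + 1)).length - 1 + 1 by omega]
        rw [pow_succ]; ring
      rw [hpow]
      omega
  | case3 x hx hr ih =>
    rw [altDigits, dif_neg hx, dif_neg hr]
    rw [PySem.Int.mod_eq_emod_of_pos (by norm_num)] at hr
    have hb : 0 ≤ x % 3 ∧ x % 3 < 3 :=
      ⟨Int.emod_nonneg x (by norm_num), Int.emod_lt_of_pos x (by norm_num)⟩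
    rw [PySem.Int.floordiv_eq_ediv_of_pos (by norm_num)] at ih ⊢
    refine ⟨by simp, ?_⟩
    by_cases h2 : x / 3 = 0
    · rw [h2]
      simp [altDigits]
      omega
    · rcases ih h2 with ⟨hne, hlt⟩
      have hL : 1 ≤ (altDigits (x / 3)).length := List.length_pos_iff.mpr hne
      simp only [List.length_append, List.length_cons, List.length_nil]
      have hpow : 3 ^ ((altDigits (x / 3)).length + 1 - 1)
          = 3 * 3 ^ ((altDigits (x / 3)).length - 1) := by
        rw [Nat.add_sub_cancel]
        conv_lhs => rw [show (altDigits (x / 3)).length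
          = (altDigits (x / 3)).length - 1 + 1 by omega]
        rw [pow_succ]; ring
      rw [hpow]
      omega

-- fromSym computes the little-endian value of the reversed string
theorem sum_range_valr : ∀ xs : List Char,
    ((List.range xs.length).map (fun i => digOf (xs.getD i ' ') * 3 ^ i)).sum = valr xs := by
  intro xs
  induction xs with
  | nil => simp [valr]
  | cons c cs ih =>
    rw [List.length_cons, List.range_succ_eq_map, List.map_cons, List.map_map]
    have hterm : ((fun i => digOf ((c :: cs).getD i ' ') * 3 ^ i) ∘ Nat.succ)
        = fun i => 3 * (digOf (cs.getD i ' ') * 3 ^ i) := by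
      funext i
      simp only [Function.comp_apply, Nat.succ_eq_add_one, List.getD_cons_succ, pow_succ]
      ring
    rw [hterm, List.sum_cons, List.sum_map_mul_left, ih]
    simp [valr]

theorem fromSym_eq (s : List Char) : fromSym s = valr s.reverse := by
  unfold fromSym
  rw [PySem.List.foldl_add, zero_add, List.map_reverse, List.sum_reverse]
  have h : s.length = s.reverse.length := (List.length_reverse).symm
  rw [h, sum_range_valr]

theorem mem_allS : ∀ (k : Nat) (s : List Char),
    s ∈ allS k ↔ s.length = k ∧ ∀ c ∈ s, alphaC c := by
  intro k
  induction k with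
  | zero => intro s; simp [allS]; rintro rfl; simp
  | succ k ih =>
    intro s
    simp only [allS, List.mem_flatMap, List.mem_map]
    constructor
    · rintro ⟨c, hc, t, ht, rfl⟩
      have := (ih t).mp ht
      refine ⟨by simp [this.1], ?_⟩
      intro x hx
      rcases List.mem_cons.mp hx with rfl | hx
      · simp at hc; rcases hc with rfl | rfl | rfl <;> simp [alphaC]
      · exact this.2 x hx
    · rintro ⟨hl, ha⟩
      cases s with
      | nil => simp at hl
      | cons c cs =>
        refine ⟨c, ?_, cs, (ih cs).mpr ⟨by simpa using hl, fun x hx => ha x (by simp [hx])⟩, rfl⟩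
        have := ha c (by simp)
        rcases this with rfl | rfl | rfl <;> simp

-- at size = length, the filter is nonempty and every element is B's digit string
theorem filter_head (n : Int) (x : List Char) (t : List (List Char))
    (hfil : (allS (altDigits n).length).filter (fun s => fromSym s == n) = x :: t) :
    x = altDigits n := by
  have hx : x ∈ (allS (altDigits n).length).filter (fun s => fromSym s == n) := by
    rw [hfil]; simp
  rw [List.mem_filter] at hx
  have hxs := (mem_allS _ _).mp hx.1
  have hxv : valr x.reverse = n := by
    have := hx.2
    simpa [fromSym_eq] using this
  have hrev : x.reverse = (altDigits n).reverse := by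
    apply valr_inj
    · intro c hc; exact hxs.2 c (List.mem_reverse.mp hc)
    · intro c hc; exact altDigits_alpha n c (List.mem_reverse.mp hc)
    · simp [hxs.1]
    · rw [hxv, valr_rev_altDigits]
  have := congrArg List.reverse hrev
  simpa using this

theorem filter_ne_nil (n : Int) :
    (allS (altDigits n).length).filter (fun s => fromSym s == n) ≠ [] := by
  intro hfil
  have hmem : altDigits n ∈ (allS (altDigits n).length).filter (fun s => fromSym s == n) := by
    rw [List.mem_filter]
    refine ⟨(mem_allS _ _).mpr ⟨rfl, altDigits_alpha n⟩, ?_⟩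
    simp [fromSym_eq, valr_rev_altDigits]
  rw [hfil] at hmem
  simp at hmem

-- the brute-force loop finds exactly B's digit string
theorem loopA_spec (n : Int) (hn : n ≠ 0) : ∀ (fuel size : Nat),
    1 ≤ size → size ≤ (altDigits n).length → (altDigits n).length - size ≤ fuel →
    loopA n size fuel = String.mk (altDigits n) := by
  intro fuel
  induction fuel with
  | zero =>
    intro size h1 h2 h3
    have hsz : size = (altDigits n).length := by omega
    rw [loopA]
    subst hsz
    cases hfil : (allS (altDigits n).length).filter (fun s => fromSym s == n) with
    | nil => exact absurd hfil (filter_ne_nil n)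
    | cons x t => rw [filter_head n x t hfil]
  | succ f ih =>
    intro size h1 h2 h3
    by_cases hsz : size = (altDigits n).length
    · rw [loopA]
      subst hsz
      cases hfil : (allS (altDigits n).length).filter (fun s => fromSym s == n) with
      | nil => exact absurd hfil (filter_ne_nil n)
      | cons x t => rw [filter_head n x t hfil]
    · -- size < length: the filter is empty, the loop recurses
      have hlt : size < (altDigits n).length := by omega
      have hfil : (allS size).filter (fun s => fromSym s == n) = [] := by
        rw [List.filter_eq_nil_iff]
        intro x hx
        have hxs := (mem_allS _ _).mp hx
        simp only [beq_iff_eq, fromSym_eq]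
        intro hv
        have hb := valr_bound x.reverse
        rw [hv] at hb
        have hlen : x.reverse.length = size := by simp [hxs.1]
        rw [hlen] at hb
        have hlb := (altDigits_lb n hn).2
        have hmono : 3 ^ size ≤ 3 ^ ((altDigits n).length - 1) :=
          Nat.pow_le_pow_right (by norm_num) (by omega)
        omega
      rw [loopA, hfil]
      exact ih (size + 1) (by omega) (by omega) (by omega)

-- within Dom the digit string has at most 21 digits, so fuel 64 never runs out
theorem altDigits_len_le (n : Int) (hdom : Dom_to_symmetric_ternary_number n) (hn : n ≠ 0) :
    (altDigits n).length ≤ 21 := by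
  by_contra h
  push_neg at h
  have hlb := (altDigits_lb n hn).2
  have h21 : (3:Nat) ^ 21 ≤ 3 ^ ((altDigits n).length - 1) :=
    Nat.pow_le_pow_right (by norm_num) (by omega)
  have habs : n.natAbs ≤ 2147483648 := by
    unfold Dom_to_symmetric_ternary_number pvDomInt at hdom
    simp at hdom
    omega
  have : (3:Nat) ^ 21 = 10460353203 := by norm_num
  omega

-- ===== VERDICT (by name: the statement is the Claim_ definition above) =====
theorem to_symmetric_ternary_number_spec : Claim_equal_to_symmetric_ternary_number := by
  intro n hdom
  unfold Spec_to_symmetric_ternary_number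
  by_cases hn : n = 0
  · subst hn
    unfold to_symmetric_ternary_number to_symmetric_ternary_number_alt
    rw [loopA]
    have hfil : (allS 1).filter (fun s => fromSym s == (0:Int)) = [['0']] := by decide
    rw [hfil]
    rfl
  · unfold to_symmetric_ternary_number to_symmetric_ternary_number_alt
    rw [if_neg hn]
    have hne := (altDigits_lb n hn).1
    have h1 : 1 ≤ (altDigits n).length := List.length_pos_iff.mpr hne
    exact loopA_spec n hn 64 1 le_rfl h1 (by have := altDigits_len_le n hdom hn; omega)
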